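-- pv_equiv track=rewrite | github.com/lakowske/unified | src/unified/environments/isolation.py | _find_available_port_offset
-- ===== SOURCE A (Python) =====
-- from typing import Any, Dict, Iterator, List, Optional, Set, Union
--
-- def _find_available_port_offset(existing_envs: List[str], base_offset: int = 1000) -> int:
--     """Find an available port offset that doesn't conflict with existing environments.
--
--     Args:
--         existing_envs: List of existing environment names
--         base_offset: Base offset to start from
--
--     Returns:
--         Available port offset
--     """
--     # This is a simplified approach - in production you'd want more sophisticated conflict detection
--     used_offsets = set()
--
--     for env_name in existing_envs:
--         if "_" in env_name:
--             try:
--                 # Extract potential offset from environment name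
--                 parts = env_name.split("_")
--                 if len(parts) >= 2 and parts[1].isdigit():
--                     used_offsets.add(int(parts[1]))
--             except (ValueError, IndexError):
--                 pass
--
--     # Find available offset
--     offset = base_offset
--     while offset in used_offsets:
--         offset += 1000
--
--     return offset
-- ===== SOURCE B (Python) =====
-- def _parse_offset(env_name):
--     """Return the offset encoded in an environment name, or None."""
--     if "_" in env_name:
--         parts = env_name.split("_")
--         if len(parts) >= 2 and parts[1].isdigit():
--             return int(parts[1])
--     return None
--
--
-- def _find_available_port_offset(existing_envs, base_offset=1000):
--     offsets = [v for v in map(_parse_offset, existing_envs) if v is not None]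
--     # only offsets on the probe grid base_offset, base_offset+1000, ... can block
--     blocking = sorted({v for v in offsets if v >= base_offset and (v - base_offset) % 1000 == 0})
--     expected = base_offset
--     for v in blocking:
--         if v == expected:
--             expected += 1000
--     return expected
-- ===== Notes on version B (the rewrite author's own statement) =====
-- stated objective: alternative
-- what changed: Replaces A's probe-upwards while loop (repeated set membership tests at base, base+1000, ...) by building the sorted deduplicated list of blocking offsets (parsed values >= base and congruent to base mod 1000) and scanning it once with a running expected value.
import Mathlib
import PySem

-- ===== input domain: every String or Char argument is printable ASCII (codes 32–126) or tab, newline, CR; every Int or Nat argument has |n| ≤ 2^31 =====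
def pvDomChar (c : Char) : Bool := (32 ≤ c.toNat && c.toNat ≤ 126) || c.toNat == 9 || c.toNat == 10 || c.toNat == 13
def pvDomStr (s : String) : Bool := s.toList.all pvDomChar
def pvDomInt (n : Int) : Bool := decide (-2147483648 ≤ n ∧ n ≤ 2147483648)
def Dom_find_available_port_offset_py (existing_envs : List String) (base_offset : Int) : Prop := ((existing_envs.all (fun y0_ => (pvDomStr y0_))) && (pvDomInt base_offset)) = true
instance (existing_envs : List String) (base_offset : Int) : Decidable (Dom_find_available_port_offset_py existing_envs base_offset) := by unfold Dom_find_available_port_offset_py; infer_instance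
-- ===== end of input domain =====

-- B replaces A's probe-the-set-upwards while loop by a sort-and-scan over the blocking
-- offsets (objective: alternative — a different algorithm of similar cost).

-- ===== PORT A =====

-- body of A's 'for env_name in existing_envs' loop (updates the used_offsets set)
def pvStepA (used : PySem.Set Int) (env_name : String) : PySem.Set Int :=
  if PySem.Str.isIn "_" env_name then
    let parts := (PySem.Str.split? env_name "_").getD []   -- sep "_" ≠ "": split? is always some
    if 2 ≤ parts.length && PySem.Str.strIsdigit ((PySem.List.pyGet? parts 1).getD "") then
      match PySem.Int.ofStr? ((PySem.List.pyGet? parts 1).getD "") with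
      | some n => PySem.Set.add used n
      | none => used  -- except ValueError: pass (unreachable after isdigit on ASCII)
    else used
  else used

-- termination of A's 'while offset in used_offsets' loop: each hit removes one element ≥ offset
theorem pvFiltDecr (S : List Int) (o : Int) (h : o ∈ S) :
    (S.filter (fun v => decide (o + 1000 ≤ v))).length < (S.filter (fun v => decide (o ≤ v))).length := by
  induction S with
  | nil => cases h
  | cons a S ih =>
    have hmono : (S.filter (fun v => decide (o + 1000 ≤ v))).length ≤ (S.filter (fun v => decide (o ≤ v))).length := by
      apply List.Sublist.length_le
      apply List.monotone_filter_right
      intro x hx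
      simp_all only [decide_eq_true_eq]
      omega
    rcases List.mem_cons.mp h with h' | h'
    · subst h'
      simp only [List.filter_cons]
      by_cases h1 : o + 1000 ≤ o <;> by_cases h2 : o ≤ o <;> simp [h1] <;> omega
    · have := ih h'
      simp only [List.filter_cons]
      by_cases h1 : o + 1000 ≤ a <;> by_cases h2 : o ≤ a <;> simp [h1, h2] <;> omega

-- A's probe loop: while offset in used_offsets: offset += 1000
def pvProbe (used : PySem.Set Int) (offset : Int) : Int :=
  if h : PySem.Set.contains used offset = true then pvProbe used (offset + 1000) else offset
termination_by (used.filter (fun v => decide (offset ≤ v))).length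
decreasing_by exact pvFiltDecr used offset ((PySem.Set.contains_iff used offset).mp h)

def find_available_port_offset_py (existing_envs : List String) (base_offset : Int) : Int :=
  let used_offsets : PySem.Set Int := existing_envs.foldl pvStepA PySem.Set.empty
  pvProbe used_offsets base_offset

-- ===== PORT B =====

-- _parse_offset: the offset encoded in an environment name, or None
def pvParseOffset (env_name : String) : Option Int :=
  if PySem.Str.isIn "_" env_name then
    let parts := (PySem.Str.split? env_name "_").getD []
    if 2 ≤ parts.length && PySem.Str.strIsdigit ((PySem.List.pyGet? parts 1).getD "") then
      PySem.Int.ofStr? ((PySem.List.pyGet? parts 1).getD "")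
    else none
  else none

def find_available_port_offset_py_alt (existing_envs : List String) (base_offset : Int) : Int :=
  let offsets : List Int := (existing_envs.map pvParseOffset).filterMap id
  let blocking : List Int :=
    PySem.List.sorted
      (PySem.Set.ofList (offsets.filter
        (fun v => decide (base_offset ≤ v) && (PySem.Int.mod (v - base_offset) 1000 == 0))))
      (fun x => x) false
  blocking.foldl (fun expected v => if v = expected then expected + 1000 else expected) base_offset

-- ===== PRECONDITION & SPEC =====
def Spec_find_available_port_offset_py (existing_envs : List String) (base_offset : Int) (out : Int) : Prop := out = find_available_port_offset_py_alt existing_envs base_offset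
instance (existing_envs : List String) (base_offset : Int) (out : Int) : Decidable (Spec_find_available_port_offset_py existing_envs base_offset out) := by unfold Spec_find_available_port_offset_py; infer_instance

-- ===== CLAIM (what is proved, stated in full; the proofs are below) =====
def Claim_equal_find_available_port_offset_py : Prop := ∀ (existing_envs : List String) (base_offset : Int), Dom_find_available_port_offset_py existing_envs base_offset → Spec_find_available_port_offset_py existing_envs base_offset (find_available_port_offset_py existing_envs base_offset)

-- ===== LEMMAS AND PROOFS =====

-- if-then-match commutation used to relate A's loop body to _parse_offset
theorem pvIfMatch (c : Bool) (X : Option Int) (used : PySem.Set Int) :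
    (if c = true then (match X with | some n => PySem.Set.add used n | none => used) else used)
    = match (if c = true then X else none) with
      | some n => PySem.Set.add used n
      | none => used := by
  cases c <;> cases X <;> rfl

-- A's per-element set update is exactly 'add the parsed offset, if any'
theorem pvStepA_eq (used : PySem.Set Int) (s : String) :
    pvStepA used s = match pvParseOffset s with
      | some n => PySem.Set.add used n
      | none => used := by
  unfold pvStepA pvParseOffset
  split_ifs with h1
  · exact pvIfMatch _ _ _
  · rfl

-- membership in A's folded set = some env parses to x
theorem pvMemUsed (l : List String) (acc : PySem.Set Int) (x : Int) :
    x ∈ l.foldl pvStepA acc ↔ x ∈ acc ∨ ∃ s ∈ l, pvParseOffset s = some x := by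
  induction l generalizing acc with
  | nil => simp
  | cons s l ih =>
    simp only [List.foldl_cons, ih, pvStepA_eq]
    cases h : pvParseOffset s with
    | none => simp [h]
    | some n => simp [h, PySem.Set.mem_add]; aesop

-- probing two lists that agree on the probe grid gives the same result
theorem pvProbeCongr (L S : List Int) (e : Int)
    (hmem : ∀ w, e ≤ w → (1000 : Int) ∣ (w - e) → (w ∈ L ↔ w ∈ S)) :
    pvProbe L e = pvProbe S e := by
  revert hmem
  induction e using pvProbe.induct (used := L) with
  | case1 e hc ih =>
    intro hmem
    have he : e ∈ S := (hmem e le_rfl (by simp)).mp ((PySem.Set.contains_iff L e).mp hc)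
    conv_lhs => rw [pvProbe]
    conv_rhs => rw [pvProbe]
    rw [dif_pos hc, dif_pos ((PySem.Set.contains_iff S e).mpr he)]
    exact ih (fun w hw hd => hmem w (by omega)
      (by have hrw : w - e = (w - (e + 1000)) + 1000 := by ring
          rw [hrw]; exact dvd_add hd ⟨1, by ring⟩))
  | case2 e hc =>
    intro hmem
    have he : e ∉ S := fun h => hc ((PySem.Set.contains_iff L e).mpr ((hmem e le_rfl (by simp)).mpr h))
    conv_lhs => rw [pvProbe]
    conv_rhs => rw [pvProbe]
    rw [dif_neg hc, dif_neg (fun h => he ((PySem.Set.contains_iff S e).mp h))]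

-- when the current candidate is below every remaining element the scan is finished
theorem pvScanStuck (L : List Int) (e : Int) (h : ∀ x ∈ L, e < x) :
    L.foldl (fun expected v => if v = expected then expected + 1000 else expected) e = e := by
  induction L with
  | nil => rfl
  | cons v L ih =>
    have hv : e < v := h v (by simp)
    simp only [List.foldl_cons, if_neg (by omega : ¬ v = e)]
    exact ih (fun x hx => h x (by simp [hx]))

-- B's scan over a strictly sorted blocking list computes A's probe over that list
theorem pvScanEqProbe (L : List Int) : ∀ (e : Int), L.Pairwise (· < ·) →
    (∀ x ∈ L, e ≤ x ∧ (1000 : Int) ∣ (x - e)) →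
    L.foldl (fun expected v => if v = expected then expected + 1000 else expected) e = pvProbe L e := by
  induction L with
  | nil =>
    intro e _ _
    rw [pvProbe]
    simp
  | cons v L ih =>
    intro e hs hc
    have hlt : ∀ x ∈ L, v < x := (List.pairwise_cons.mp hs).1
    have hvc := hc v (by simp)
    by_cases hve : v = e
    · subst hve
      rw [List.foldl_cons, if_pos rfl]
      have hstep : ∀ x ∈ L, v + 1000 ≤ x ∧ (1000 : Int) ∣ (x - (v + 1000)) := by
        intro x hx
        obtain ⟨_, hd⟩ := hc x (by simp [hx])
        have hx1000 : 1000 ≤ x - v := Int.le_of_dvd (by have := hlt x hx; omega) hd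
        refine ⟨by omega, ?_⟩
        have hrw : x - (v + 1000) = (x - v) + (-1) * 1000 := by ring
        rw [hrw]; exact dvd_add hd ⟨-1, by ring⟩
      rw [ih (v + 1000) (List.pairwise_cons.mp hs).2 hstep]
      rw [pvProbeCongr L (v :: L) (v + 1000)
        (fun w hw _ => by
          constructor
          · intro hmem; exact List.mem_cons_of_mem _ hmem
          · intro hmem
            rcases List.mem_cons.mp hmem with h' | h'
            · omega
            · exact h')]
      conv_rhs => rw [pvProbe]
      rw [dif_pos ((PySem.Set.contains_iff (v :: L) v).mpr (by simp))]
    · have hev : e < v := by obtain ⟨h1, _⟩ := hvc; omega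
      simp only [List.foldl_cons, if_neg hve]
      rw [pvScanStuck L e (fun x hx => lt_trans hev (hlt x hx))]
      rw [pvProbe]
      rw [dif_neg (fun h => by
        rcases List.mem_cons.mp ((PySem.Set.contains_iff (v :: L) e).mp h) with h' | h'
        · exact hve h'.symm
        · exact absurd (hlt e h') (by omega))]

-- ===== VERDICT (by name: the statement is the Claim_ definition above) =====
theorem find_available_port_offset_py_spec : Claim_equal_find_available_port_offset_py := by
  intro existing_envs base_offset _
  unfold Spec_find_available_port_offset_py
  unfold find_available_port_offset_py find_available_port_offset_py_alt
  set offsets : List Int := (existing_envs.map pvParseOffset).filterMap id with hoff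
  set p : Int → Bool := fun v => decide (base_offset ≤ v) && (PySem.Int.mod (v - base_offset) 1000 == 0) with hp
  set blocking := PySem.List.sorted (PySem.Set.ofList (offsets.filter p)) (fun x => x) false with hb
  have hmemB : ∀ x, x ∈ blocking ↔ x ∈ offsets ∧ base_offset ≤ x ∧ (1000 : Int) ∣ (x - base_offset) := by
    intro x
    rw [hb, PySem.List.mem_sorted, PySem.Set.mem_ofList, List.mem_filter, hp]
    simp only [Bool.and_eq_true, decide_eq_true_eq, beq_iff_eq]
    rw [PySem.Int.mod_eq_zero_iff_dvd]
  have hpair : blocking.Pairwise (· < ·) := PySem.List.sorted_ofList_pairwise_lt _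
  rw [pvScanEqProbe blocking base_offset hpair (fun x hx => ((hmemB x).mp hx).2)]
  apply pvProbeCongr
  intro w hw hd
  rw [hmemB w]
  have hu : w ∈ existing_envs.foldl pvStepA PySem.Set.empty ↔ ∃ s ∈ existing_envs, pvParseOffset s = some w := by
    rw [pvMemUsed]
    simp [PySem.Set.empty]
  have hofs : w ∈ offsets ↔ ∃ s ∈ existing_envs, pvParseOffset s = some w := by
    rw [hoff]
    simp [List.mem_filterMap]
  rw [hu, ← hofs]
  tauto
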